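-- pv_equiv track=rewrite | github.com/hallamlab/TreeSAPP | treesapp/clade_exclusion_evaluator.py | determine_offset
-- ===== SOURCE A (Python) =====
-- def determine_offset(classified, optimal):
--     # Figure out which taxonomic lineage is longer
--     offset = 0
--     while classified != optimal and offset < 7:
--         offset += 1
--         classified_ranks = classified.split("; ")
--         optimal_ranks = optimal.split("; ")
--         if len(classified_ranks) > len(optimal_ranks):
--             classified = "; ".join(classified_ranks[:-1])
--         elif len(classified_ranks) < len(optimal_ranks):
--             optimal = "; ".join(optimal_ranks[:-1])
--         else:
--             optimal = "; ".join(optimal_ranks[:-1])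
--             classified = "; ".join(classified_ranks[:-1])
--     return offset
-- ===== SOURCE B (Python) =====
-- def determine_offset(classified, optimal):
--     c = classified.split("; ")
--     o = optimal.split("; ")
--     d = abs(len(c) - len(o))
--     m = min(len(c), len(o))
--     lcp = 0
--     while lcp < m and c[lcp] == o[lcp]:
--         lcp += 1
--     return min(7, d + (m - lcp))
-- ===== Notes on version B (the rewrite author's own statement) =====
-- stated objective: simpler
-- what changed: Replaces A's repeated trim-join-resplit while loop with a single split of each lineage followed by a closed-form count min(7, length-difference + (shorter-length - longest-common-prefix)).
import Mathlib
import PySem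

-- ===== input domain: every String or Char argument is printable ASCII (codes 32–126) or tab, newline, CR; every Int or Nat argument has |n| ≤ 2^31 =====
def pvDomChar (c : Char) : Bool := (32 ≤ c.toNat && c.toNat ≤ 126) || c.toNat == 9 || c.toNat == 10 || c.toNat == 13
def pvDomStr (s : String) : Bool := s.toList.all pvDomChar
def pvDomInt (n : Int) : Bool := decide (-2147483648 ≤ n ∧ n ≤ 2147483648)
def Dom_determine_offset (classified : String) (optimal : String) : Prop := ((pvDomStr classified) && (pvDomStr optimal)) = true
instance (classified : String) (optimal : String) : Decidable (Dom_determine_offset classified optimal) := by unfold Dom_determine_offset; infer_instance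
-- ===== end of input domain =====

-- B replaces A's repeated trim/join/re-split while loop by one split of each string and a
-- closed-form count; objective: simpler (no speed claim).

-- ===== PORT A =====
-- A's while loop: offset goes 0,1,…,7 (it increments once per iteration and the guard stops
-- at 7), so 7 iterations always suffice: the fuel only realises the `offset < 7` guard.
def determine_offset_loop (fuel : Nat) (classified : String) (optimal : String) (offset : Int) : Int :=
  match fuel with
  | 0 => offset
  | f + 1 =>
    if classified ≠ optimal ∧ offset < 7 then
      let offset := offset + 1
      let classified_ranks := (PySem.Str.split? classified "; ").getD []
      let optimal_ranks := (PySem.Str.split? optimal "; ").getD []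
      if classified_ranks.length > optimal_ranks.length then
        determine_offset_loop f
          (PySem.Str.join "; " (PySem.List.slice classified_ranks none (some (-1)))) optimal offset
      else if classified_ranks.length < optimal_ranks.length then
        determine_offset_loop f classified
          (PySem.Str.join "; " (PySem.List.slice optimal_ranks none (some (-1)))) offset
      else
        determine_offset_loop f
          (PySem.Str.join "; " (PySem.List.slice classified_ranks none (some (-1))))
          (PySem.Str.join "; " (PySem.List.slice optimal_ranks none (some (-1)))) offset
    else offset

def determine_offset (classified : String) (optimal : String) : Int :=
  determine_offset_loop 7 classified optimal 0

-- ===== PORT B =====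
-- the `while lcp < m and c[lcp] == o[lcp]` counter of Source B
def lcpLenStr (c : List String) (o : List String) : Nat :=
  match c, o with
  | a :: as', b :: bs => if a = b then lcpLenStr as' bs + 1 else 0
  | _, _ => 0

def determine_offset_alt (classified : String) (optimal : String) : Int :=
  let c := (PySem.Str.split? classified "; ").getD []
  let o := (PySem.Str.split? optimal "; ").getD []
  let d : Int := |(c.length : Int) - (o.length : Int)|
  let m : Int := min (c.length : Int) (o.length : Int)
  let lcp : Int := (lcpLenStr c o : Int)
  min 7 (d + (m - lcp))

-- ===== PRECONDITION & SPEC =====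
def Spec_determine_offset (classified : String) (optimal : String) (out : Int) : Prop := out = determine_offset_alt classified optimal
instance (classified : String) (optimal : String) (out : Int) : Decidable (Spec_determine_offset classified optimal out) := by unfold Spec_determine_offset; infer_instance

-- ===== CLAIM (what is proved, stated in full; the proofs are below) =====
def Claim_equal_determine_offset : Prop := ∀ (classified : String) (optimal : String), Dom_determine_offset classified optimal → Spec_determine_offset classified optimal (determine_offset classified optimal)

-- ===== LEMMAS AND PROOFS =====

-- `sp l` = Python's l.split("; ") written as a clean structural recursion (proof-side model).
def sp : List Char → List (List Char)
  | [] => [[]]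
  | [c] => [[c]]
  | c1 :: c2 :: rest =>
    if c1 = ';' ∧ c2 = ' ' then [] :: sp rest
    else
      match sp (c2 :: rest) with
      | p :: ps => (c1 :: p) :: ps
      | [] => [[c1]]

def mapHead (f : List Char → List Char) : List (List Char) → List (List Char)
  | [] => []
  | p :: ps => f p :: ps

def jn (ps : List (List Char)) : List Char := List.intercalate [';', ' '] ps

def sf : List Char → Bool
  | c1 :: c2 :: rest => !(c1 = ';' && c2 = ' ') && sf (c2 :: rest)
  | _ => true

theorem sp_ne_nil (l : List Char) : sp l ≠ [] := by
  induction l using sp.induct with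
  | case1 => simp [sp]
  | case2 c => simp [sp]
  | case3 c1 c2 rest h ih => simp [sp, h]
  | case4 c1 c2 rest h p ps hsp ih => simp [sp, if_neg h, hsp]
  | case5 c1 c2 rest h hsp ih => exact absurd hsp ih

-- convenient equations
theorem sp_cons_cons_sep (rest : List Char) : sp (';' :: ' ' :: rest) = [] :: sp rest := by
  simp [sp]

theorem sp_cons_cons_ne (c1 c2 : Char) (rest : List Char) (h : ¬(c1 = ';' ∧ c2 = ' ')) :
    sp (c1 :: c2 :: rest) = mapHead (c1 :: ·) (sp (c2 :: rest)) := by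
  cases hh : sp (c2 :: rest) with
  | nil => exact absurd hh (sp_ne_nil _)
  | cons p ps => simp [sp, if_neg h, hh, mapHead]

theorem sp_singleton (c : Char) : sp [c] = [[c]] := by simp [sp]

theorem go_eq (fuel : Nat) (l cur : List Char) (acc : List (List Char))
    (h : l.length < fuel) :
    PySem.Chars.splitOn.go [';', ' '] fuel l cur acc
      = acc.reverse ++ mapHead (cur.reverse ++ ·) (sp l) := by
  induction fuel generalizing l cur acc with
  | zero => omega
  | succ f ih =>
    match l with
    | [] => simp [PySem.Chars.splitOn.go, sp, mapHead]
    | c :: rest =>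
      by_cases hp : List.isPrefixOf [';', ' '] (c :: rest)
      · have hdec : ∃ rest', c :: rest = ';' :: ' ' :: rest' := by
          rw [List.isPrefixOf_iff_prefix] at hp
          obtain ⟨t, ht⟩ := hp
          exact ⟨t, ht.symm⟩
        obtain ⟨rest', hr⟩ := hdec
        rw [hr] at h ⊢
        rw [show PySem.Chars.splitOn.go [';',' '] (f+1) (';' :: ' ' :: rest') cur acc
             = PySem.Chars.splitOn.go [';',' '] f (List.drop 2 (';' :: ' ' :: rest')) [] (cur.reverse :: acc) by
          simp [PySem.Chars.splitOn.go, List.isPrefixOf]]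
        rw [ih _ _ _ (by simpa using by simp at h; omega)]
        simp [sp_cons_cons_sep, mapHead]
        cases sp rest' <;> rfl
      · rw [show PySem.Chars.splitOn.go [';',' '] (f+1) (c :: rest) cur acc
             = PySem.Chars.splitOn.go [';',' '] f rest (c :: cur) acc by
          simp [PySem.Chars.splitOn.go, hp]]
        rw [ih _ _ _ (by simp at h ⊢; omega)]
        have hne : ¬(c = ';' ∧ (rest.head?.getD 'x') = ' ') ∨ rest = [] := by
          cases rest with
          | nil => right; rfl
          | cons c2 r =>
            left; intro ⟨h1, h2⟩
            simp at h2
            apply hp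
            simp [h1, h2, List.isPrefixOf]
        cases rest with
        | nil => simp [sp, mapHead]
        | cons c2 r =>
          have : ¬(c = ';' ∧ c2 = ' ') := by
            rcases hne with h' | h'
            · simpa using h'
            · simp at h'
          rw [sp_cons_cons_ne _ _ _ this]
          cases hh : sp (c2 :: r) with
          | nil => exact absurd hh (sp_ne_nil _)
          | cons p ps => simp [mapHead]

theorem splitOn_eq_sp (l : List Char) : PySem.Chars.splitOn l [';', ' '] = sp l := by
  rw [PySem.Chars.splitOn, go_eq _ _ _ _ (by omega)]
  cases hh : sp l with
  | nil => exact absurd hh (sp_ne_nil _)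
  | cons p ps => simp [mapHead]

theorem jn_cons (p : List Char) (ps : List (List Char)) (h : ps ≠ []) :
    jn (p :: ps) = p ++ ';' :: ' ' :: jn ps := by
  cases ps with
  | nil => simp at h
  | cons q qs =>
    simp [jn, List.intercalate, List.intersperse]

theorem jn_sp (l : List Char) : jn (sp l) = l := by
  induction l using sp.induct with
  | case1 => simp [sp, jn, List.intercalate]
  | case2 c => simp [sp, jn, List.intercalate]
  | case3 c1 c2 rest h ih =>
    obtain ⟨h1, h2⟩ := h; subst h1; subst h2
    rw [sp_cons_cons_sep, jn_cons _ _ (sp_ne_nil _), ih]; rfl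
  | case4 c1 c2 rest h p ps hsp ih =>
    rw [sp_cons_cons_ne _ _ _ h, hsp, mapHead]
    cases ps with
    | nil =>
      have := ih; rw [hsp] at this
      simp [jn, List.intercalate] at this ⊢; simp [this]
    | cons q qs =>
      rw [jn_cons _ _ (by simp)]
      have := ih; rw [hsp, jn_cons _ _ (by simp)] at this
      simp [this]
  | case5 c1 c2 rest h hsp ih => exact absurd hsp (sp_ne_nil _)

theorem sp_head_cases (c : Char) (rest : List Char) :
    (sp (c :: rest)).head? = some [] ∨ ∃ t, (sp (c :: rest)).head? = some (c :: t) := by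
  cases rest with
  | nil => right; exact ⟨[], by simp [sp_singleton]⟩
  | cons c2 r =>
    by_cases h : c = ';' ∧ c2 = ' '
    · left; obtain ⟨h1, h2⟩ := h; subst h1; subst h2; rw [sp_cons_cons_sep]; rfl
    · right
      rw [sp_cons_cons_ne _ _ _ h]
      cases hh : sp (c2 :: r) with
      | nil => exact absurd hh (sp_ne_nil _)
      | cons p ps => exact ⟨p, by simp [mapHead]⟩

theorem sf_sp (l : List Char) : ∀ p ∈ sp l, sf p = true := by
  induction l using sp.induct with
  | case1 => simp [sp, sf]
  | case2 c => simp [sp, sf]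
  | case3 c1 c2 rest h ih =>
    obtain ⟨h1, h2⟩ := h; subst h1; subst h2
    rw [sp_cons_cons_sep]
    intro p hp
    rcases hp with _ | hp
    · rfl
    · exact ih _ (by assumption)
  | case4 c1 c2 rest h p ps hsp ih =>
    rw [sp_cons_cons_ne _ _ _ h, hsp, mapHead]
    intro q hq
    rcases List.mem_cons.mp hq with hq | hq
    · subst hq
      have hps : sf p = true := ih _ (by rw [hsp]; exact List.mem_cons_self ..)
      have hhd := sp_head_cases c2 rest
      rw [hsp] at hhd
      simp at hhd
      rcases hhd with hhd | ⟨t, hhd⟩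
      · subst hhd; simp [sf]
      · subst hhd
        simp [sf] at hps ⊢
        exact ⟨by tauto, hps⟩
    · exact ih _ (by rw [hsp]; exact List.mem_cons_of_mem _ hq)
  | case5 c1 c2 rest h hsp ih => exact absurd hsp (sp_ne_nil _)

theorem sp_self (p : List Char) (h : sf p = true) : sp p = [p] := by
  induction p using sp.induct with
  | case1 => simp [sp]
  | case2 c => simp [sp]
  | case3 c1 c2 rest hc ih =>
    obtain ⟨h1, h2⟩ := hc; subst h1; subst h2
    simp [sf] at h
  | case4 c1 c2 rest hc q qs hsp ih =>
    have : sf (c2 :: rest) = true := by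
      simp [sf] at h; exact h.2
    rw [sp_cons_cons_ne _ _ _ hc, ih this, mapHead]
  | case5 c1 c2 rest hc hsp ih => exact absurd hsp (sp_ne_nil _)

theorem sp_append (p t : List Char) (h : sf p = true) :
    sp (p ++ ';' :: ' ' :: t) = p :: sp t := by
  induction p with
  | nil => simpa using sp_cons_cons_sep t
  | cons c rest ih =>
    cases rest with
    | nil =>
      have hne : ¬(c = ';' ∧ (';' : Char) = ' ') := by simp
      simp only [List.cons_append, List.nil_append]
      rw [sp_cons_cons_ne _ _ _ hne, sp_cons_cons_sep, mapHead]
    | cons c2 r =>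
      have hsf : sf (c2 :: r) = true := by simp [sf] at h; exact h.2
      have hne : ¬(c = ';' ∧ c2 = ' ') := by simp [sf] at h; tauto
      simp only [List.cons_append]
      rw [sp_cons_cons_ne _ _ _ hne]
      have := ih hsf
      simp only [List.cons_append] at this
      rw [this, mapHead]

theorem sp_jn (ps : List (List Char)) (hne : ps ≠ []) (h : ∀ p ∈ ps, sf p = true) :
    sp (jn ps) = ps := by
  induction ps with
  | nil => simp at hne
  | cons p ps ih =>
    cases ps with
    | nil =>
      have : jn [p] = p := by simp [jn, List.intercalate]
      rw [this, sp_self p (h p (by simp))]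
    | cons q qs =>
      rw [jn_cons _ _ (by simp)]
      rw [sp_append _ _ (h p (by simp))]
      rw [ih (by simp) (fun r hr => h r (List.mem_cons_of_mem _ hr))]

theorem sp_inj (c o : List Char) (h : sp c = sp o) : c = o := by
  have := jn_sp c
  rw [h, jn_sp o] at this
  exact this.symm

-- lcp lemmas
def lcpLen (c o : List (List Char)) : Nat :=
  match c, o with
  | a :: as', b :: bs => if a = b then lcpLen as' bs + 1 else 0
  | _, _ => 0

def Nval (c o : List (List Char)) : Nat :=
  (max c.length o.length - min c.length o.length) + (min c.length o.length - lcpLen c o)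

theorem lcpLen_le (c o : List (List Char)) : lcpLen c o ≤ min c.length o.length := by
  induction c generalizing o with
  | nil => simp [lcpLen]
  | cons a as ih =>
    cases o with
    | nil => simp [lcpLen]
    | cons b bs =>
      simp only [lcpLen]
      split_ifs
      · have := ih bs; simp; omega
      · omega

theorem lcpLen_eq_iff (c o : List (List Char)) (h : c.length = o.length) :
    lcpLen c o = c.length ↔ c = o := by
  induction c generalizing o with
  | nil => cases o <;> simp_all [lcpLen]
  | cons a as ih =>
    cases o with
    | nil => simp at h
    | cons b bs =>
      simp only [lcpLen, List.length_cons]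
      split_ifs with hab
      · subst hab
        simp only [List.cons.injEq, true_and]
        rw [Nat.add_right_cancel_iff]
        exact ih bs (by simpa using h)
      · constructor
        · intro hz; simp at hz
        · intro he; injection he with h1 _; exact absurd h1 hab

theorem Nval_eq_zero_iff (c o : List (List Char)) : Nval c o = 0 ↔ c = o := by
  unfold Nval
  constructor
  · intro h
    have hle := lcpLen_le c o
    have hlen : c.length = o.length := by omega
    have : lcpLen c o = c.length := by omega
    exact (lcpLen_eq_iff c o hlen).mp this
  · intro h; subst h
    have : lcpLen c c = c.length := (lcpLen_eq_iff c c rfl).mpr rfl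
    omega

theorem lcpLen_take_left (k : Nat) (c o : List (List Char)) (h : o.length ≤ k) :
    lcpLen (c.take k) o = lcpLen c o := by
  induction c generalizing o k with
  | nil => simp
  | cons a as ih =>
    cases k with
    | zero =>
      cases o with
      | nil => simp [lcpLen]
      | cons _ _ => simp at h
    | succ k =>
      cases o with
      | nil => simp [lcpLen]
      | cons b bs =>
        simp only [List.take_succ_cons, lcpLen]
        split_ifs
        · rw [ih k bs (by simpa using h)]
        · rfl

theorem lcpLen_take_both (k : Nat) (c o : List (List Char)) :
    lcpLen (c.take k) (o.take k) = min (lcpLen c o) k := by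
  induction c generalizing o k with
  | nil => simp [lcpLen]
  | cons a as ih =>
    cases k with
    | zero => simp [lcpLen]
    | succ k =>
      cases o with
      | nil => simp [lcpLen]
      | cons b bs =>
        simp only [List.take_succ_cons, lcpLen]
        split_ifs
        · rw [ih k bs]; omega
        · simp

theorem lcpLen_dropLast_left (c o : List (List Char)) (h : o.length < c.length) :
    lcpLen c.dropLast o = lcpLen c o := by
  rw [List.dropLast_eq_take, lcpLen_take_left _ _ _ (by omega)]

theorem lcpLen_comm_zero : ∀ (c o : List (List Char)), lcpLen c o = lcpLen o c := by
  intro c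
  induction c with
  | nil => intro o; cases o <;> simp [lcpLen]
  | cons a as ih =>
    intro o
    cases o with
    | nil => simp [lcpLen]
    | cons b bs =>
      simp only [lcpLen]
      by_cases hab : a = b
      · subst hab; simp [ih bs]
      · rw [if_neg hab, if_neg (fun hh => hab hh.symm)]

theorem lcpLen_dropLast_both (c o : List (List Char)) (h : c.length = o.length) :
    lcpLen c.dropLast o.dropLast = min (lcpLen c o) (c.length - 1) := by
  rw [List.dropLast_eq_take, List.dropLast_eq_take, ← h, lcpLen_take_both]

theorem Nval_dropLast_left (c o : List (List Char)) (h : o.length < c.length) :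
    Nval c.dropLast o = Nval c o - 1 ∧ 1 ≤ Nval c o := by
  unfold Nval
  rw [lcpLen_dropLast_left c o h, List.length_dropLast]
  have := lcpLen_le c o
  constructor <;> omega

theorem Nval_comm (c o : List (List Char)) : Nval c o = Nval o c := by
  unfold Nval; rw [lcpLen_comm_zero]; omega

theorem Nval_dropLast_right (c o : List (List Char)) (h : c.length < o.length) :
    Nval c o.dropLast = Nval c o - 1 ∧ 1 ≤ Nval c o := by
  rw [Nval_comm c o.dropLast, Nval_comm c o]
  exact Nval_dropLast_left o c h

theorem Nval_dropLast_both (c o : List (List Char)) (h : c.length = o.length) (hne : c ≠ o) :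
    Nval c.dropLast o.dropLast = Nval c o - 1 ∧ 1 ≤ Nval c o := by
  have hlcp := lcpLen_le c o
  have hlt : lcpLen c o < c.length := by
    rcases Nat.lt_or_ge (lcpLen c o) c.length with hl | hl
    · exact hl
    · have : lcpLen c o = c.length := by omega
      exact absurd ((lcpLen_eq_iff c o h).mp this) hne
  unfold Nval
  rw [lcpLen_dropLast_both c o h, List.length_dropLast, List.length_dropLast]
  omega

theorem split_port (s : String) :
    (PySem.Str.split? s "; ").getD [] = (sp s.toList).map String.ofList := by
  rw [PySem.Str.split?]
  have : PySem.Chars.split? s.toList "; ".toList = some (sp s.toList) := by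
    rw [PySem.Chars.split?]
    simp [show ("; ".toList) = [';',' '] from rfl, splitOn_eq_sp]
  rw [this]
  rfl

theorem join_port (ps : List (List Char)) :
    (PySem.Str.join "; " (List.map String.ofList ps)).toList = jn ps := by
  rw [PySem.Str.join]
  have h1 : ∀ (l : List Char), (String.ofList l).toList = l := by intro l; simp
  rw [h1, PySem.Chars.join, jn, List.map_map]
  have h2 : List.map (String.toList ∘ String.ofList) ps = ps := by
    conv_rhs => rw [← List.map_id ps]
    apply List.map_congr_left
    intro a _
    simp
  rw [h2]
  rfl

theorem lcpLenStr_eq (c o : List (List Char)) :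
    lcpLenStr (c.map String.ofList) (o.map String.ofList) = lcpLen c o := by
  induction c generalizing o with
  | nil => cases o <;> simp [lcpLenStr, lcpLen]
  | cons a as ih =>
    cases o with
    | nil => simp [lcpLenStr, lcpLen]
    | cons b bs =>
      simp only [List.map_cons, lcpLenStr, lcpLen]
      have : (String.ofList a = String.ofList b) ↔ a = b := by
        constructor
        · intro h
          have := congrArg String.toList h
          simpa using this
        · intro h; rw [h]
      split_ifs with h1 h2 <;> try rfl
      · rw [ih bs]
      · exact absurd (this.mp h1) h2
      · exact absurd (this.mpr (by assumption)) h1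

theorem slice_dropLast {α : Type} (xs : List α) :
    PySem.List.slice xs none (some (-1)) = xs.dropLast := by
  simp [PySem.List.slice, List.dropLast_eq_take]

theorem toList_inj (a b : String) (h : a.toList = b.toList) : a = b := by
  have := congrArg String.ofList h
  simpa using this

theorem sp_toList_ne (c o : String) (h : c ≠ o) : sp c.toList ≠ sp o.toList := by
  intro hh
  exact h (toList_inj _ _ (sp_inj _ _ hh))

theorem loop_eq (fuel : Nat) (c o : String) (offset : Int)
    (hf : offset + fuel = 7) :
    determine_offset_loop fuel c o offset
      = min 7 (offset + (Nval (sp c.toList) (sp o.toList) : Int)) := by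
  induction fuel generalizing c o offset with
  | zero =>
    have : offset = 7 := by omega
    subst this
    rw [determine_offset_loop]
    have : (0:Int) ≤ (Nval (sp c.toList) (sp o.toList) : Int) := Int.natCast_nonneg _
    omega
  | succ f ih =>
    by_cases heq : c = o
    · subst heq
      rw [determine_offset_loop, if_neg (by simp)]
      have h0 : Nval (sp c.toList) (sp c.toList) = 0 := (Nval_eq_zero_iff _ _).mpr rfl
      rw [h0]
      simp
      omega
    · have hlt : offset < 7 := by omega
      rw [determine_offset_loop, if_pos ⟨heq, hlt⟩]
      simp only [split_port, slice_dropLast, List.length_map, ← List.map_dropLast]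
      set cs := sp c.toList with hcs
      set os := sp o.toList with hos
      have hnecs : cs ≠ os := sp_toList_ne c o heq
      have hsf_c : ∀ p ∈ cs, sf p = true := sf_sp _
      have hsf_o : ∀ p ∈ os, sf p = true := sf_sp _
      have hcne : cs ≠ [] := sp_ne_nil _
      have hone : os ≠ [] := sp_ne_nil _
      by_cases h1 : cs.length > os.length
      · rw [if_pos h1]
        have hdne : cs.dropLast ≠ [] := by
          have := List.length_pos_of_ne_nil hone
          intro hh
          have := congrArg List.length hh
          simp [List.length_dropLast] at this
          omega
        have hspnew : sp (PySem.Str.join "; " (List.map String.ofList cs.dropLast)).toList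
            = cs.dropLast := by
          rw [join_port, sp_jn _ hdne (fun p hp => hsf_c p (List.dropLast_subset _ hp))]
        rw [ih _ _ _ (by omega), hspnew, ← hos]
        obtain ⟨hN, hN1⟩ := Nval_dropLast_left cs os h1
        rw [hN]
        have : (0:Nat) ≤ Nval cs os := Nat.zero_le _
        omega
      · rw [if_neg h1]
        by_cases h2 : cs.length < os.length
        · rw [if_pos h2]
          have hdne : os.dropLast ≠ [] := by
            have := List.length_pos_of_ne_nil hcne
            intro hh
            have := congrArg List.length hh
            simp [List.length_dropLast] at this
            omega
          have hspnew : sp (PySem.Str.join "; " (List.map String.ofList os.dropLast)).toList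
              = os.dropLast := by
            rw [join_port, sp_jn _ hdne (fun p hp => hsf_o p (List.dropLast_subset _ hp))]
          rw [ih _ _ _ (by omega), hspnew, ← hcs]
          obtain ⟨hN, hN1⟩ := Nval_dropLast_right cs os h2
          rw [hN]
          omega
        · rw [if_neg h2]
          have hlen : cs.length = os.length := by omega
          obtain ⟨hN, hN1⟩ := Nval_dropLast_both cs os hlen hnecs
          by_cases hone1 : os.length = 1
          · -- both singletons: the trimmed strings are both "" and the loop stops next round
            have hcs1 : cs.length = 1 := by omega
            have hcd : cs.dropLast = [] := by
              rw [List.dropLast_eq_take, hcs1]; simp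
            have hod : os.dropLast = [] := by
              rw [List.dropLast_eq_take, hone1]; simp
            rw [hcd, hod]
            have hN' : Nval cs os = 1 := by
              have hl := lcpLen_le cs os
              have hne' : lcpLen cs os ≠ cs.length := fun hh => hnecs ((lcpLen_eq_iff cs os hlen).mp hh)
              unfold Nval
              omega
            rw [ih _ _ _ (by omega)]
            rw [hN']
            have : Nval (sp (PySem.Str.join "; " (List.map String.ofList [])).toList)
                (sp (PySem.Str.join "; " (List.map String.ofList [])).toList) = 0 :=
              (Nval_eq_zero_iff _ _).mpr rfl
            rw [this]
            omega
          · have hdneo : os.dropLast ≠ [] := by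
              have := List.length_pos_of_ne_nil hone
              intro hh
              have := congrArg List.length hh
              simp [List.length_dropLast] at this
              omega
            have hdnec : cs.dropLast ≠ [] := by
              have := List.length_pos_of_ne_nil hcne
              intro hh
              have := congrArg List.length hh
              simp [List.length_dropLast] at this
              omega
            have hspc : sp (PySem.Str.join "; " (List.map String.ofList cs.dropLast)).toList
                = cs.dropLast := by
              rw [join_port, sp_jn _ hdnec (fun p hp => hsf_c p (List.dropLast_subset _ hp))]
            have hspo : sp (PySem.Str.join "; " (List.map String.ofList os.dropLast)).toList
                = os.dropLast := by
              rw [join_port, sp_jn _ hdneo (fun p hp => hsf_o p (List.dropLast_subset _ hp))]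
            rw [ih _ _ _ (by omega), hspc, hspo, hN]
            omega


theorem alt_eq (c o : String) :
    determine_offset_alt c o = min 7 ((Nval (sp c.toList) (sp o.toList) : Int)) := by
  unfold determine_offset_alt
  rw [split_port, split_port]
  simp only [lcpLenStr_eq, List.length_map]
  have hl := lcpLen_le (sp c.toList) (sp o.toList)
  unfold Nval
  rcases abs_cases (((sp c.toList).length : Int) - ((sp o.toList).length : Int)) with ⟨h1, h2⟩ | ⟨h1, h2⟩ <;>
    rw [h1] <;> omega

-- ===== VERDICT (by name: the statement is the Claim_ definition above) =====
theorem determine_offset_spec : Claim_equal_determine_offset := by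
  intro classified optimal _
  unfold Spec_determine_offset determine_offset
  rw [loop_eq 7 classified optimal 0 (by norm_num), alt_eq]
  norm_num
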